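-- pv_equiv track=rewrite | github.com/mw263/MeaPED | fasta_msa_to_phylips_red.py | missing_ends
-- ===== SOURCE A (Python) =====
-- def missing_ends(seq) :
--   seq = list(seq)
--   for i in range(len(seq)) :
--     if seq[i] == '-' :
--       seq[i] = '?'
--     else:
--       break
--   for i in range(-1, -len(seq), -1) :
--     if seq[i] == '-' :
--       seq[i] = '?'
--     else:
--       break
--   return("".join(seq))
-- ===== SOURCE B (Python) =====
-- def missing_ends(seq):
--     seq = list(seq)
--     n = len(seq)
--     n_lead = 0
--     while n_lead < n and seq[n_lead] == '-':
--         n_lead += 1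
--     if n_lead == n:
--         return '?' * n
--     n_trail = 0
--     while seq[n - 1 - n_trail] == '-':
--         n_trail += 1
--     return '?' * n_lead + ''.join(seq[n_lead:n - n_trail]) + '?' * n_trail
-- ===== Notes on version B (the rewrite author's own statement) =====
-- stated objective: simpler
-- what changed: B counts the leading and trailing gap runs and assembles the result from three pieces ('?'*lead + untouched interior + '?'*trail) instead of converting a list copy in place with two index loops.
import Mathlib
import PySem

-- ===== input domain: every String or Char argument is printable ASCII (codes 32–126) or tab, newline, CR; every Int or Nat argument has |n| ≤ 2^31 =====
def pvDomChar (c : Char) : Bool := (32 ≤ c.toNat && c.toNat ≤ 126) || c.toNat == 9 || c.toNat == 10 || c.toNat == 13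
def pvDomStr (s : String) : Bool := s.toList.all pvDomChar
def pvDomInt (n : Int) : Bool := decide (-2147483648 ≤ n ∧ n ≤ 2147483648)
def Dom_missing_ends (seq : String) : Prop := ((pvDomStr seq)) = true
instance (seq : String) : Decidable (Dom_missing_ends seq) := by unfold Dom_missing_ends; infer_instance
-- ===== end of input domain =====

-- B replaces A's two in-place index loops by counting the gap runs and assembling
-- '?'*lead ++ interior ++ '?'*trail; same behaviour, simpler decomposition (no speed claim).

-- ===== PORT A =====
-- first loop of A: walk from the front, turning '-' into '?', break at the first non-'-'
def pvFwdA : List Char → List Char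
  | [] => []
  | c :: rest => if c == '-' then '?' :: pvFwdA rest else c :: rest

-- second loop of A: range(-1, -len, -1) touches indices -1 .. -(len-1), i.e. at most
-- len-1 elements from the back; modelled as the same break-loop on the reversed list,
-- fuelled by len-1 so index 0 is never touched (exact transcription of the range bound)
def pvBwdA : List Char → Nat → List Char
  | l, 0 => l
  | [], _ + 1 => []
  | c :: rest, k + 1 => if c == '-' then '?' :: pvBwdA rest k else c :: rest

def missing_ends (seq : String) : String :=
  let l := pvFwdA seq.toList
  String.ofList (pvBwdA l.reverse (l.length - 1)).reverse

-- ===== PORT B =====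
-- Source B's first while loop: count the leading '-' run
def pvLead : List Char → Nat
  | [] => 0
  | c :: rest => if c == '-' then pvLead rest + 1 else 0

def missing_ends_alt (seq : String) : String :=
  let l := seq.toList
  let n := l.length
  let nl := pvLead l
  if nl = n then String.ofList (List.replicate n '?')
  else
    -- Source B's second while loop counts the trailing '-' run = leading run of the reverse
    let nt := pvLead l.reverse
    -- seq[n_lead : n - n_trail] with 0 ≤ nl ≤ n - nt ≤ n is exactly (take (n-nt)).drop nl
    String.ofList (List.replicate nl '?' ++ ((l.take (n - nt)).drop nl) ++ List.replicate nt '?')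

-- ===== PRECONDITION & SPEC =====
def Spec_missing_ends (seq : String) (out : String) : Prop := out = missing_ends_alt seq
instance (seq : String) (out : String) : Decidable (Spec_missing_ends seq out) := by unfold Spec_missing_ends; infer_instance

-- ===== CLAIM (what is proved, stated in full; the proofs are below) =====
def Claim_equal_missing_ends : Prop := ∀ (seq : String), Dom_missing_ends seq → Spec_missing_ends seq (missing_ends seq)

-- ===== LEMMAS AND PROOFS =====

theorem pvLead_le (l : List Char) : pvLead l ≤ l.length := by
  induction l with
  | nil => simp [pvLead]
  | cons c rest ih =>
    by_cases h : c = '-' <;> simp [pvLead, h]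
    omega

theorem pvFwdA_eq (l : List Char) :
    pvFwdA l = List.replicate (pvLead l) '?' ++ l.drop (pvLead l) := by
  induction l with
  | nil => rfl
  | cons c rest ih =>
    by_cases h : c = '-'
    · simp [pvFwdA, pvLead, h, ih, List.replicate_succ]
    · simp [pvFwdA, pvLead, h]

theorem pvBwdA_eq (l : List Char) (k : Nat) :
    pvBwdA l k = List.replicate (min (pvLead l) k) '?' ++ l.drop (min (pvLead l) k) := by
  induction l generalizing k with
  | nil => cases k <;> simp [pvBwdA, pvLead]
  | cons c rest ih =>
    cases k with
    | zero => simp [pvBwdA]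
    | succ k =>
      by_cases h : c = '-'
      · simp [pvBwdA, pvLead, h, ih, Nat.succ_min_succ, List.replicate_succ]
      · simp [pvBwdA, pvLead, h]

-- the leading run of '-' is literally replicate (pvLead l) '-'
theorem takeWhile_dash (l : List Char) :
    l.takeWhile (· == '-') = List.replicate (pvLead l) '-' := by
  induction l with
  | nil => rfl
  | cons c rest ih =>
    by_cases h : c = '-' <;>
      simp [pvLead, h, ih, List.replicate_succ]

theorem pvLead_append_stop (xs ys : List Char) (c : Char) (hc : ¬ c = '-') :
    pvLead (xs ++ c :: ys) = pvLead xs := by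
  induction xs with
  | nil => simp [pvLead, hc]
  | cons x rest ih => by_cases h : x = '-' <;> simp [pvLead, h, ih]

theorem pvLead_replicate_q (n : Nat) : pvLead (List.replicate n '?') = 0 := by
  cases n with
  | zero => rfl
  | succ k => rfl

-- head of the remainder after the leading run is not '-'
theorem drop_lead_head (l : List Char) (c : Char) (m : List Char)
    (h : l.drop (pvLead l) = c :: m) : ¬ c = '-' := by
  induction l with
  | nil => simp at h
  | cons x rest ih =>
    by_cases hx : x = '-'
    · simp [pvLead, hx] at h; exact ih h
    · simp [pvLead, hx] at h; rw [← h.1]; exact hx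

theorem lead_decomp (l : List Char) :
    l = List.replicate (pvLead l) '-' ++ l.drop (pvLead l) := by
  conv_lhs => rw [← List.takeWhile_append_dropWhile (p := (· == '-')) (l := l)]
  rw [takeWhile_dash]
  congr 1
  induction l with
  | nil => rfl
  | cons c rest ih =>
    by_cases h : c = '-' <;> simp [pvLead, h, ih]

-- ===== VERDICT (by name: the statement is the Claim_ definition above) =====
theorem missing_ends_spec : Claim_equal_missing_ends := by
  intro seq _
  unfold Spec_missing_ends missing_ends missing_ends_alt
  set l := seq.toList with hl
  set nl := pvLead l with hnl
  by_cases hall : nl = l.length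
  · -- all characters are '-': the forward loop converts everything, the backward loop breaks at once
    simp only [← hnl, if_pos hall]
    have h1 : pvFwdA l = List.replicate l.length '?' := by
      rw [pvFwdA_eq, ← hnl, hall]; simp
    rw [h1]
    have h2 : (List.replicate l.length '?').reverse = List.replicate l.length '?' := by simp
    rw [h2, pvBwdA_eq, pvLead_replicate_q]
    simp
  · simp only [← hnl, if_neg hall]
    have hle : nl ≤ l.length := pvLead_le l
    have hlt : nl < l.length := lt_of_le_of_ne hle hall
    obtain ⟨c, m, hcm⟩ : ∃ c m, l.drop nl = c :: m := by
      rcases h : l.drop nl with _ | ⟨c, m⟩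
      · exfalso; have := congrArg List.length h; simp at this; omega
      · exact ⟨c, m, rfl⟩
    have hc : ¬ c = '-' := drop_lead_head l c m hcm
    have hmlen : m.length = l.length - nl - 1 := by
      have := congrArg List.length hcm; simp at this; omega
    -- the list after the forward loop
    have hfwd : pvFwdA l = List.replicate nl '?' ++ c :: m := by
      rw [pvFwdA_eq, ← hnl, hcm]
    have hfwdlen : (pvFwdA l).length = l.length := by
      rw [hfwd]; simp; omega
    rw [hfwd]
    have hrev : (List.replicate nl '?' ++ c :: m).reverse
        = m.reverse ++ c :: List.replicate nl '?' := by simp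
    rw [hrev]
    set nt := pvLead m.reverse with hnt
    have hntm : nt ≤ m.length := by
      have := pvLead_le m.reverse; simpa using this
    have hleadrev : pvLead (m.reverse ++ c :: List.replicate nl '?') = nt := by
      rw [pvLead_append_stop _ _ _ hc, hnt]
    -- fuel n-1 does not bind: nt ≤ m.length = n - nl - 1 ≤ n - 1
    have hk : min (pvLead (m.reverse ++ c :: List.replicate nl '?'))
        ((List.replicate nl '?' ++ c :: m).length - 1) = nt := by
      rw [hleadrev]
      have : (List.replicate nl '?' ++ c :: m).length = l.length := by simp; omega
      rw [this]; omega
    rw [pvBwdA_eq, hk]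
    have hdropnt : (m.reverse ++ c :: List.replicate nl '?').drop nt
        = m.reverse.drop nt ++ c :: List.replicate nl '?' := by
      rw [List.drop_append_of_le_length (by simpa using hntm)]
    rw [hdropnt]
    -- B's trailing count equals nt
    have hlsplit : l = List.replicate nl '-' ++ c :: m := by
      conv_lhs => rw [lead_decomp l]
      rw [← hnl, hcm]
    have hBnt : pvLead l.reverse = nt := by
      rw [hlsplit]; simp only [List.reverse_append, List.reverse_cons, List.reverse_replicate]
      rw [List.append_assoc, List.singleton_append, pvLead_append_stop _ _ _ hc, hnt]
    rw [hBnt]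
    -- B's interior slice
    have hslice : (l.take (l.length - nt)).drop nl = c :: m.take (m.length - nt) := by
      rw [List.drop_take, hcm]
      have h2 : l.length - nt - nl = (m.length - nt) + 1 := by omega
      rw [h2, List.take_succ_cons]
    rw [hslice]
    -- assemble: reverse of A's backward-loop result = B's three pieces
    have hrevdrop : (m.reverse.drop nt).reverse = m.take (m.length - nt) := by
      rw [List.reverse_drop]; simp
    congr 1
    simp only [List.reverse_append, List.reverse_cons, List.reverse_replicate, hrevdrop]
    simp
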